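-- pv_equiv track=rewrite | github.com/manwar/perlweeklychallenge-club | challenge-285/pokgopun/python/ch-1.py | nc
-- ===== SOURCE A (Python) =====
-- def nc(routes: tuple):
--     dct = dict()
--     for src,dst in routes:
--         if dct.get(src,True):
--             dct[src] = False
--         dct.setdefault(dst,True)
--     for k,v in dct.items():
--         if v:
--             return k
--     return None
-- ===== SOURCE B (Python) =====
-- def nc(routes: tuple):
--     for _, dst in routes:
--         if all(src != dst for src, _ in routes):
--             return dst
--     return None
-- ===== Notes on version B (the rewrite author's own statement) =====
-- stated objective: simpler
-- what changed: Replaces A's one-pass per-city boolean dict (insert False for sources, setdefault True for destinations, then scan dict items) by a brute-force nested scan with no auxiliary structure: for each route in order, check all routes and return the first destination that never occurs as a source.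
import Mathlib
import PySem

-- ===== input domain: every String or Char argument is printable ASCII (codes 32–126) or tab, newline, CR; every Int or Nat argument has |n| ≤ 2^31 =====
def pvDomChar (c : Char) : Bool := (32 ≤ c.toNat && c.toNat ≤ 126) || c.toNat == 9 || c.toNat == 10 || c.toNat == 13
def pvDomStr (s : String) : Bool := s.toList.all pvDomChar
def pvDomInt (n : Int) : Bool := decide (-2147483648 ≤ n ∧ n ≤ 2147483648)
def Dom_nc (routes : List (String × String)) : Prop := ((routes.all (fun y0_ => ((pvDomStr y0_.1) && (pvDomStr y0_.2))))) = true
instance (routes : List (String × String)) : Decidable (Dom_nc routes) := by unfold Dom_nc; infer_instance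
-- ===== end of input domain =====

-- B drops A's per-city boolean dict entirely: a brute-force nested scan returns the first
-- destination that never occurs as a source (simpler, no auxiliary structure; O(n^2) vs O(n)).

-- ===== PORT A =====
-- loop body: if dct.get(src,True): dct[src] = False ; dct.setdefault(dst,True)
def ncStep (d : PySem.Dict String Bool) (p : String × String) : PySem.Dict String Bool :=
  (if (d.getD p.1 true) then d.insert p.1 false else d).setdefault p.2 true

def nc (routes : List (String × String)) : Option String :=
  let dct := routes.foldl ncStep PySem.Dict.empty
  -- for k,v in dct.items(): if v: return k ; return None
  (dct.items.find? (fun kv => kv.2)).map (fun kv => kv.1)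

-- ===== PORT B =====
def nc_alt (routes : List (String × String)) : Option String :=
  -- for _, dst in routes: if all(src != dst for src, _ in routes): return dst ; return None
  (routes.find? (fun p => routes.all (fun q => !(q.1 == p.2)))).map (fun p => p.2)

-- ===== PRECONDITION & SPEC =====
def Spec_nc (routes : List (String × String)) (out : Option String) : Prop := out = nc_alt routes
instance (routes : List (String × String)) (out : Option String) : Decidable (Spec_nc routes out) := by unfold Spec_nc; infer_instance

-- ===== CLAIM (what is proved, stated in full; the proofs are below) =====
def Claim_equal_nc : Prop := ∀ (routes : List (String × String)), Dom_nc routes → Spec_nc routes (nc routes)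

-- ===== LEMMAS AND PROOFS =====

-- the effect of "if dct.get(src,True): dct[src]=False" on one stored item
def ncG (s : String) (p : String × Bool) : String × Bool := if p.1 == s then (s, false) else p

theorem ncG_fst (s : String) (p : String × Bool) : (ncG s p).1 = p.1 := by
  by_cases h : p.1 = s <;> simp [ncG, h]

theorem ncG_eq_self (s : String) (p : String × Bool) (h : ¬ p.1 = s) : ncG s p = p := by
  simp [ncG, h]

-- generalized invariant for A's fold, with an arbitrary accumulator dict:
-- the first old key whose stored value stays True wins; otherwise the first route whose
-- destination is neither a remaining source nor an old key delivers the answer.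
theorem nc_main (rs : List (String × String)) (d : PySem.Dict String Bool)
    (hd : d.keys.Nodup) :
    ((rs.foldl ncStep d).items.find? (fun kv => kv.2)).map (fun kv => kv.1)
    = match d.items.find? (fun kv => kv.2 && !((rs.map (fun p => p.1)).contains kv.1)) with
      | some kv => some kv.1
      | none =>
        (rs.find? (fun p => !((rs.map (fun q => q.1)).contains p.2) && !(d.keys.contains p.2))).map
          (fun p => p.2) := by
  induction rs generalizing d with
  | nil =>
    simp only [List.foldl_nil, List.map_nil, List.elem_nil, Bool.not_false, Bool.and_true,
      List.find?_nil]
    cases hfd : d.items.find? (fun kv => kv.2) <;> simp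
  | cons p rest ih =>
    obtain ⟨s, t⟩ := p
    set D1 := if d.getD s true then d.insert s false else d with hD1
    -- the first statement's effect on the items: overwrite at s, tail appended if s is fresh
    have h1items : D1.items = d.items.map (ncG s) ++ (if d.contains s then [] else [(s, false)]) := by
      by_cases hgd : d.getD s true = true
      · by_cases hcs : d.contains s = true
        · rw [hD1, if_pos hgd, PySem.Dict.items_insert_of_contains d false hcs, hcs, if_pos rfl,
            List.append_nil]
          rfl
        · have hcs' : d.contains s = false := by simpa using hcs
          rw [hD1, if_pos hgd, PySem.Dict.items_insert_of_not_contains d false hcs', hcs',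
            if_neg (by simp)]
          congr 1
          have hmap : d.items.map (ncG s) = d.items.map id := by
            apply List.map_congr_left
            intro p hp
            refine ncG_eq_self s p ?_
            intro he
            exact hcs ((PySem.Dict.contains_iff_mem_keys d s).mpr
              (he ▸ PySem.Dict.mem_keys_of_mem_items d hp))
          rw [hmap, List.map_id]
      · -- getD s true = false: s is a key storing False, so the dict is unchanged
        have hcs : d.contains s = true := by
          by_contra hc
          exact hgd (PySem.Dict.getD_of_not_contains d true (by simpa using hc))
        rw [hD1, if_neg hgd, hcs, if_pos rfl, List.append_nil]
        have hval : d.get? s = some false := by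
          cases hq : d.get? s with
          | none => exact absurd (by rw [PySem.Dict.getD_eq_get?_getD, hq]; rfl) hgd
          | some v =>
            have hv : v = false := by
              rw [PySem.Dict.getD_eq_get?_getD, hq] at hgd
              simpa using hgd
            rw [hv]
        have hmap : d.items.map (ncG s) = d.items.map id := by
          apply List.map_congr_left
          intro p hp
          by_cases h : p.1 = s
          · have hget : d.get? p.1 = some p.2 := PySem.Dict.get?_of_mem_items d (by
              rcases p with ⟨k, v⟩; exact hp) hd
            rw [h, hval] at hget
            have hv : p.2 = false := by simpa using hget.symm
            rcases p with ⟨k, v⟩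
            simp only at h hv
            simp [ncG, h, hv]
          · exact ncG_eq_self s p h
        rw [hmap, List.map_id]
    have hD1mem : ∀ x, x ∈ D1.keys ↔ x ∈ d.keys ∨ x = s := by
      intro x
      by_cases hgd : d.getD s true = true
      · rw [hD1, if_pos hgd, PySem.Dict.mem_keys_insert d s x false]
        tauto
      · have hcs : d.contains s = true := by
          by_contra hc
          exact hgd (PySem.Dict.getD_of_not_contains d true (by simpa using hc))
        have hsmem : s ∈ d.keys := (PySem.Dict.contains_iff_mem_keys d s).mp hcs
        rw [hD1, if_neg hgd]
        constructor
        · exact Or.inl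
        · rintro (h | rfl)
          · exact h
          · exact hsmem
    have h1nodup : D1.keys.Nodup := by
      by_cases hgd : d.getD s true = true
      · rw [hD1, if_pos hgd]; exact PySem.Dict.nodup_keys_insert d s false hd
      · rw [hD1, if_neg hgd]; exact hd
    -- find? over the mapped old items computes the old find? with the extended source list
    have hfindmap :
        (d.items.map (ncG s)).find?
            (fun kv => kv.2 && !((rest.map (fun p : String × String => p.1)).contains kv.1))
        = (d.items.find? (fun kv => kv.2 &&
            !((s :: rest.map (fun p : String × String => p.1)).contains kv.1))).map (ncG s) := by
      rw [List.find?_map]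
      have hpe : ((fun kv : String × Bool => kv.2 &&
            !((rest.map (fun p : String × String => p.1)).contains kv.1)) ∘ (ncG s))
          = (fun kv : String × Bool => kv.2 &&
            !((s :: rest.map (fun p : String × String => p.1)).contains kv.1)) := by
        funext kv
        by_cases h : kv.1 = s
        · simp [ncG, Function.comp, h]
        · simp [ncG, Function.comp, h, show (kv.1 == s) = false from by simp [h]]
      rw [hpe]
    -- the possible [(s, False)] tail never matches
    have ht1 : ((if d.contains s then [] else [(s, false)]) : List (String × Bool)).find?
          (fun kv => kv.2 && !((rest.map (fun p : String × String => p.1)).contains kv.1))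
        = none := by
      by_cases hcs : d.contains s = true <;> simp [hcs]
    rw [List.foldl_cons]
    simp only [List.map_cons]
    by_cases hct : D1.contains t = true
    · -- destination already a key: setdefault is a no-op
      have hd' : ncStep d (s, t) = D1 := by
        show D1.setdefault t true = D1
        exact PySem.Dict.setdefault_of_contains D1 true hct
      rw [hd', ih D1 h1nodup, h1items, List.find?_append, hfindmap, ht1, Option.or_none]
      have htk : t ∈ d.keys ∨ t = s :=
        (hD1mem t).mp ((PySem.Dict.contains_iff_mem_keys D1 t).mp hct)
      cases hfd : d.items.find? (fun kv => kv.2 &&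
          !((s :: rest.map (fun p : String × String => p.1)).contains kv.1)) with
      | some kv => simp [ncG_fst s kv]
      | none =>
        simp only [Option.map_none]
        have hhead : (!((s :: rest.map (fun q : String × String => q.1)).contains t) &&
            !(d.keys.contains t)) = false := by
          rcases htk with h | rfl
          · simp [List.contains_eq_mem, h]
          · simp [List.contains_eq_mem]
        rw [List.find?_cons_of_neg (p := fun p : String × String =>
            !((s :: rest.map (fun q : String × String => q.1)).contains p.2) &&
              !(d.keys.contains p.2)) (by simpa using hhead)]
        have hpe : (fun p : String × String =>
              !((rest.map (fun q : String × String => q.1)).contains p.2) &&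
                !(D1.keys.contains p.2))
            = (fun p : String × String =>
              !((s :: rest.map (fun q : String × String => q.1)).contains p.2) &&
                !(d.keys.contains p.2)) := by
          funext x
          rw [Bool.eq_iff_iff]
          simp [List.contains_eq_mem, hD1mem x.2]
          tauto
        rw [hpe]
    · -- fresh destination: appended with value True
      have hct' : D1.contains t = false := by simpa using hct
      have hd' : ncStep d (s, t) = D1.insert t true := by
        show D1.setdefault t true = D1.insert t true
        exact PySem.Dict.setdefault_of_not_contains D1 true hct'
      have htk : ¬ (t ∈ d.keys ∨ t = s) := fun h =>
        hct ((PySem.Dict.contains_iff_mem_keys D1 t).mpr ((hD1mem t).mpr h))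
      have h2items : (D1.insert t true).items = D1.items ++ [(t, true)] :=
        PySem.Dict.items_insert_of_not_contains D1 true hct'
      have h2nodup : (D1.insert t true).keys.Nodup :=
        PySem.Dict.nodup_keys_insert D1 t true h1nodup
      have h2mem : ∀ x, x ∈ (D1.insert t true).keys ↔ x ∈ d.keys ∨ x = s ∨ x = t := by
        intro x
        rw [PySem.Dict.mem_keys_insert D1 t x true, hD1mem x]
        tauto
      rw [hd', ih _ h2nodup, h2items, h1items, List.find?_append, List.find?_append,
        hfindmap, ht1, Option.or_none]
      by_cases hts : t ∈ rest.map (fun p : String × String => p.1)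
      · have htail : (([(t, true)] : List (String × Bool)).find?
            (fun kv => kv.2 && !((rest.map (fun p : String × String => p.1)).contains kv.1)))
            = none := by simp [hts]
        rw [htail, Option.or_none]
        cases hfd : d.items.find? (fun kv => kv.2 &&
            !((s :: rest.map (fun p : String × String => p.1)).contains kv.1)) with
        | some kv => simp [ncG_fst s kv]
        | none =>
          simp only [Option.map_none]
          have hhead : (!((s :: rest.map (fun q : String × String => q.1)).contains t) &&
              !(d.keys.contains t)) = false := by
            simp [List.contains_eq_mem, hts]
          rw [List.find?_cons_of_neg (p := fun p : String × String =>
              !((s :: rest.map (fun q : String × String => q.1)).contains p.2) &&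
                !(d.keys.contains p.2)) (by simpa using hhead)]
          have hpe : (fun p : String × String =>
                !((rest.map (fun q : String × String => q.1)).contains p.2) &&
                  !((D1.insert t true).keys.contains p.2))
              = (fun p : String × String =>
                !((s :: rest.map (fun q : String × String => q.1)).contains p.2) &&
                  !(d.keys.contains p.2)) := by
            funext x
            rw [Bool.eq_iff_iff]
            by_cases hxt : x.2 = t
            · simp [List.contains_eq_mem, hxt, hts]
            · simp [List.contains_eq_mem, h2mem x.2, hxt]
              tauto
          rw [hpe]
      · have htail : (([(t, true)] : List (String × Bool)).find?
            (fun kv => kv.2 && !((rest.map (fun p : String × String => p.1)).contains kv.1)))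
            = some (t, true) := by simp [hts]
        rw [htail]
        cases hfd : d.items.find? (fun kv => kv.2 &&
            !((s :: rest.map (fun p : String × String => p.1)).contains kv.1)) with
        | some kv => simp [ncG_fst s kv]
        | none =>
          simp only [Option.map_none, Option.none_or]
          have hk : t ∉ d.keys := fun h => htk (Or.inl h)
          have hs : ¬ t = s := fun h => htk (Or.inr h)
          have hhead : (!((s :: rest.map (fun q : String × String => q.1)).contains t) &&
              !(d.keys.contains t)) = true := by
            simp [List.contains_eq_mem, hs, hts, hk]
          rw [List.find?_cons_of_pos (p := fun p : String × String =>
              !((s :: rest.map (fun q : String × String => q.1)).contains p.2) &&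
                !(d.keys.contains p.2)) (by simpa using hhead)]
          simp

-- ===== VERDICT (by name: the statement is the Claim_ definition above) =====
theorem nc_spec : Claim_equal_nc := by
  intro routes _
  show nc routes = nc_alt routes
  have h := nc_main routes PySem.Dict.empty PySem.Dict.nodup_keys_empty
  unfold nc nc_alt
  rw [h]
  rw [show (PySem.Dict.empty : PySem.Dict String Bool).items = [] from rfl, List.find?_nil]
  have hpe : (fun p : String × String =>
        !((routes.map (fun q : String × String => q.1)).contains p.2) &&
          !((PySem.Dict.empty : PySem.Dict String Bool).keys.contains p.2))
      = (fun p : String × String => routes.all (fun q => !(q.1 == p.2))) := by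
    funext p
    rw [Bool.eq_iff_iff]
    simp [show (PySem.Dict.empty : PySem.Dict String Bool).keys = [] from rfl,
      List.contains_eq_mem, List.mem_map, List.all_eq_true]
    aesop
  rw [hpe]
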